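-- pv_equiv track=rewrite | github.com/Wzzz233/VHDL_Project | ARM/ocr_phase0_metrics.py | norm_text
-- ===== SOURCE A (Python) =====
-- def norm_text(s: str) -> str:
--     if s is None:
--         return ""
--     out = []
--     for ch in s.strip():
--         if ch in {" ", "\t", "-", "_"}:
--             continue
--         if "a" <= ch <= "z":
--             out.append(chr(ord(ch) - 32))
--         else:
--             out.append(ch)
--     return "".join(out)
-- ===== SOURCE B (Python) =====
-- def norm_text(s: str) -> str:
--     if s is None:
--         return ""
--     table = {ord(c): None for c in " \t-_"}
--     for o in range(ord("a"), ord("z") + 1):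
--         table[o] = o - 32
--     return s.strip().translate(table)
-- ===== Notes on version B (the rewrite author's own statement) =====
-- stated objective: idiomatic
-- what changed: Replaces the explicit per-character branch loop with a precomputed translation table (separators -> delete, a-z -> their uppercase ordinals) applied in one str.translate pass.
import Mathlib
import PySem

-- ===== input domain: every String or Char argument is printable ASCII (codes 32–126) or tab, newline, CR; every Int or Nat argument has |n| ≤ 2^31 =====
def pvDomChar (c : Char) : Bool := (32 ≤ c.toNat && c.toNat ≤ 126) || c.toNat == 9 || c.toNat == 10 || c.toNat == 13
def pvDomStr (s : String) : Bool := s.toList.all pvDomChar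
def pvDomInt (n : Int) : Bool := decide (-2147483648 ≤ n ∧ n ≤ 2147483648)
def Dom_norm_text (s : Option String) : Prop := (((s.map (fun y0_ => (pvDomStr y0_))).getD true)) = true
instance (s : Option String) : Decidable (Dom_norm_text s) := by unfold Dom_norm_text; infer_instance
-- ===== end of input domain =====

-- B replaces A's explicit per-character branch loop with a precomputed translation
-- table applied in one translate pass (idiomatic; same asymptotic cost).

-- ===== PORT A =====
def norm_text (s : Option String) : String :=
  match s with
  | none => ""
  | some s =>
    let out : List Char :=
      (PySem.Str.strip s).toList.foldl
        (fun out ch =>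
          if ch == ' ' || ch == '\t' || ch == '-' || ch == '_' then out
          else if 'a' ≤ ch ∧ ch ≤ 'z' then out ++ [Char.ofNat (ch.toNat - 32)]
          else out ++ [ch]) []
    String.mk out

-- ===== PORT B =====
-- the translation table: separator ordinals ↦ none (delete), 97..122 ↦ ordinal - 32
def pvTable : PySem.Dict Int (Option Int) :=
  let t := (" \t-_".toList).foldl
    (fun d c => d.insert (c.toNat : Int) none) PySem.Dict.empty
  (PySem.List.pyRange 97 123 1).foldl (fun d o => d.insert o (some (o - 32))) t

-- str.translate ported by hand (exact for this table: values are chr-range ints or None;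
-- a missing key keeps the character, None deletes it, an int replaces it by chr)
def pvTranslate (tbl : PySem.Dict Int (Option Int)) : List Char → List Char
  | [] => []
  | c :: rest =>
    match tbl.get? (c.toNat : Int) with
    | none => c :: pvTranslate tbl rest
    | some none => pvTranslate tbl rest
    | some (some o) => Char.ofNat o.toNat :: pvTranslate tbl rest

def norm_text_alt (s : Option String) : String :=
  match s with
  | none => ""
  | some s => String.mk (pvTranslate pvTable (PySem.Str.strip s).toList)

-- ===== PRECONDITION & SPEC =====
def Spec_norm_text (s : Option String) (out : String) : Prop := out = norm_text_alt s
instance (s : Option String) (out : String) : Decidable (Spec_norm_text s out) := by unfold Spec_norm_text; infer_instance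

-- ===== CLAIM (what is proved, stated in full; the proofs are below) =====
def Claim_equal_norm_text : Prop := ∀ (s : Option String), Dom_norm_text s → Spec_norm_text s (norm_text s)

-- ===== LEMMAS AND PROOFS =====

-- per-character result of A's loop body
def pvStepA (ch : Char) : List Char :=
  if ch == ' ' || ch == '\t' || ch == '-' || ch == '_' then []
  else if 'a' ≤ ch ∧ ch ≤ 'z' then [Char.ofNat (ch.toNat - 32)]
  else [ch]

-- per-character result of B's translate
def pvStepB (ch : Char) : List Char :=
  match pvTable.get? (ch.toNat : Int) with
  | none => [ch]
  | some none => []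
  | some (some o) => [Char.ofNat o.toNat]

theorem pvFoldA_eq_flatMap (cs : List Char) (acc : List Char) :
    cs.foldl
      (fun out ch =>
        if ch == ' ' || ch == '\t' || ch == '-' || ch == '_' then out
        else if 'a' ≤ ch ∧ ch ≤ 'z' then out ++ [Char.ofNat (ch.toNat - 32)]
        else out ++ [ch]) acc = acc ++ cs.flatMap pvStepA := by
  induction cs generalizing acc with
  | nil => simp
  | cons c rest ih =>
    simp only [List.foldl_cons, List.flatMap_cons, ih, pvStepA]
    split_ifs <;> simp

theorem pvTranslate_eq_flatMap (cs : List Char) :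
    pvTranslate pvTable cs = cs.flatMap pvStepB := by
  induction cs with
  | nil => rfl
  | cons c rest ih =>
    simp only [pvTranslate, pvStepB, List.flatMap_cons, ← ih]
    rcases h : pvTable.get? (c.toNat : Int) with _ | (_ | o) <;> simp

set_option maxRecDepth 20000 in
theorem pvStep_eq_ofNat : ∀ n : Nat, n < 128 → pvStepA (Char.ofNat n) = pvStepB (Char.ofNat n) := by
  decide

theorem pvStep_eq (c : Char) (h : pvDomChar c = true) : pvStepA c = pvStepB c := by
  have hlt : c.toNat < 128 := by
    simp only [pvDomChar, Bool.or_eq_true, Bool.and_eq_true, decide_eq_true_eq,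
      beq_iff_eq] at h
    omega
  have := pvStep_eq_ofNat c.toNat hlt
  rwa [Char.ofNat_toNat] at this

theorem pvFlatMap_eq (cs : List Char) (h : ∀ c ∈ cs, pvDomChar c = true) :
    cs.flatMap pvStepA = cs.flatMap pvStepB := by
  induction cs with
  | nil => rfl
  | cons c rest ih =>
    simp only [List.flatMap_cons]
    rw [pvStep_eq c (h c (List.mem_cons_self)), ih (fun d hd => h d (List.mem_cons_of_mem _ hd))]

theorem pvStrip_subset (cs : List Char) : ∀ c ∈ PySem.Chars.strip cs, c ∈ cs := by
  intro c hc
  simp only [PySem.Chars.strip, PySem.Chars.rstrip, PySem.Chars.lstrip] at hc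
  have h1 := (List.dropWhile_sublist (l := (List.dropWhile PySem.Chars.isspace cs).reverse)
    (p := PySem.Chars.isspace)).subset
  have h2 := (List.dropWhile_sublist (l := cs) (p := PySem.Chars.isspace)).subset
  rw [List.mem_reverse] at hc
  exact h2 (List.mem_reverse.mp (h1 hc))

-- ===== VERDICT (by name: the statement is the Claim_ definition above) =====
set_option maxHeartbeats 1000000 in
theorem norm_text_spec : Claim_equal_norm_text := by
  intro s hdom
  unfold Spec_norm_text
  cases s with
  | none => rfl
  | some s =>
    simp only [norm_text, norm_text_alt]
    rw [pvFoldA_eq_flatMap, pvTranslate_eq_flatMap, List.nil_append]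
    congr 1
    apply pvFlatMap_eq
    intro c hc
    have hmem : c ∈ s.toList := by
      have := pvStrip_subset s.toList
      rw [PySem.Str.toList_strip] at hc
      exact this c hc
    simp only [Dom_norm_text, Option.map_some, Option.getD_some, pvDomStr,
      List.all_eq_true] at hdom
    exact hdom c hmem
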